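-- pv_equiv track=rewrite | github.com/gabrielemongirdaite/advent_of_code_2023 | day12.py | count_combinations
-- ===== SOURCE A (Python) =====
-- import itertools
--
-- def current_grouping(spring, sign):
--     r = 0
--     tmp = [r]
--     indices = [-1]
--     for ind, i in enumerate(spring):
--         if i == sign:
--             r += 1
--             tmp[-1] = r
--             indices[-1] = ind
--         else:
--             r = 0
--             tmp.append(0)
--             indices.append(-1)
--     return [x for x in tmp if x != 0], [x for x in indices if x != -1]
--
-- def count_combinations(spring, group):
--     repeat = spring.count('?')
--     combo = list(itertools.product(['.', '#'], repeat=repeat))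
--     r = 0
--     possible_springs = []
--     for i in combo:
--         new_spring = spring
--         for j in i:
--             new_spring = new_spring.replace('?', j, 1)
--         current_setup = current_grouping(new_spring, '#')[0]
--         if current_setup == group:
--             r += 1
--             possible_springs.append(new_spring)
--     return r, possible_springs
-- ===== SOURCE B (Python) =====
-- def count_combinations(spring, group):
--     # DFS backtracking (explicit stack) over the string, trying '.' before '#' at
--     # each '?' (so the output order matches exhaustive lexicographic enumeration),
--     # pruning any branch whose damaged-group prefix can no longer equal `group`,
--     # so only the surviving search tree is explored.
--     # A frame is (i, acc, gi, run): position, chosen prefix as a linked node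
--     # (parent, char) or None, number of fully-matched groups, open '#'-run length.
--     n = len(spring)
--     glen = len(group)
--     out = []
--     stack = [(0, None, 0, 0)]
--     while stack:
--         i, acc, gi, run = stack.pop()
--         if i == n:
--             if (run == 0 and gi == glen) or (run > 0 and gi + 1 == glen and group[gi] == run):
--                 chars = []
--                 node = acc
--                 while node is not None:
--                     chars.append(node[1])
--                     node = node[0]
--                 out.append(''.join(reversed(chars)))
--             continue
--         c = spring[i]
--         # push '#' first so the '.' branch is explored first
--         if c == '?' or c == '#':
--             if gi < glen and run + 1 <= group[gi]:
--                 stack.append((i + 1, (acc, '#'), gi, run + 1))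
--         if c != '#':
--             ch = '.' if c == '?' else c
--             if run > 0:
--                 if group[gi] == run:
--                     stack.append((i + 1, (acc, ch), gi + 1, 0))
--             else:
--                 stack.append((i + 1, (acc, ch), gi, 0))
--     return len(out), out
-- ===== Notes on version B (the rewrite author's own statement) =====
-- stated objective: alternative
-- what changed: A materialises all 2^q fillings of the '?' positions and tests each one's damaged-group sequence; B does a DFS backtracking with an explicit stack over the string ('.' tried before '#', preserving A's output order) that tracks the matched group prefix and current '#'-run and prunes any branch that can no longer match, so work is proportional to the surviving search tree rather than to 2^q.
import Mathlib
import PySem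

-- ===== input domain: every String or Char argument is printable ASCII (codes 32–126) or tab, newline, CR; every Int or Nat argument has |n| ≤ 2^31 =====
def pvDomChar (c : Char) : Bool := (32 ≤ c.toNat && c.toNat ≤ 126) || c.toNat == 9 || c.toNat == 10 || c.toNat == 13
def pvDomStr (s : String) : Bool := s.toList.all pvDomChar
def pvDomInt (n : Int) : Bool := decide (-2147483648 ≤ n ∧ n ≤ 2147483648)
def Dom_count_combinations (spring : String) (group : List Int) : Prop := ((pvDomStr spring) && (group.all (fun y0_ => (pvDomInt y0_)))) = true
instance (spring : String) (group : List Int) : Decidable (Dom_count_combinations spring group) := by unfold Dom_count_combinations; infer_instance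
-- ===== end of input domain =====

-- B replaces A's exhaustive 2^q enumeration of all '?'-fillings with a pruned DFS
-- backtracking ('.' tried before '#', so the lexicographic output order is kept);
-- objective: alternative (an output-sensitive search instead of full enumeration).


-- ===== PORT A =====
-- s.replace('?', j, 1) — hand port for a single-char pattern: replaces the FIRST
-- occurrence of `old`, identity if absent (exact for this call shape).
def pvReplaceOnce (s : List Char) (old new' : Char) : List Char :=
  match s with
  | [] => []
  | c :: t => if c = old then new' :: t else c :: pvReplaceOnce t old new'

-- list(itertools.product(['.', '#'], repeat=n)) — hand port, exact order
-- (leftmost component varies slowest).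
def pvProduct (n : Nat) : List (List Char) :=
  match n with
  | 0 => [[]]
  | Nat.succ m => ['.', '#'].flatMap (fun c => (pvProduct m).map (fun cs => c :: cs))

-- current_grouping: the Python works on the string's characters; state is (r, tmp, indices).
-- tmp[-1] = r / indices[-1] = ind are PySem.List.pySetD at -1 (tmp, indices are never empty).
def current_grouping (spring : List Char) (sign : Char) : List Int × List Int :=
  let fin := (PySem.List.enumerate spring 0).foldl
    (fun (st : Int × List Int × List Int) p =>
      if p.2 = sign then
        let r := st.1 + 1
        (r, PySem.List.pySetD st.2.1 (-1) r, PySem.List.pySetD st.2.2 (-1) p.1)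
      else (0, st.2.1 ++ [0], st.2.2 ++ [(-1 : Int)]))
    (0, [0], [-1])
  (fin.2.1.filter (fun x => x != 0), fin.2.2.filter (fun x => x != -1))

def count_combinations (spring : String) (group : List Int) : Int × List String :=
  let rpt := PySem.Str.count spring "?"
  let combo := pvProduct rpt
  combo.foldl
    (fun (st : Int × List String) i =>
      let new_spring := i.foldl (fun ns j => pvReplaceOnce ns '?' j) spring.toList
      let current_setup := (current_grouping new_spring '#').1
      if current_setup = group then (st.1 + 1, st.2 ++ [String.mk new_spring]) else st)
    (0, [])

-- ===== PORT B =====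
-- The while-loop of Source B: a stack of frames (rest, acc, gi, run) — `rest` is
-- spring[i:], `acc` the linked prefix node as a reversed char list, `gi` the
-- number of fully-matched groups, `run` the open '#'-run.  pushesB is the
-- frame-push step for one character (the '.'-frame first, so it is popped
-- before the '#'-frame, as in Source B); group[gi] is read only under guards that
-- make the access in-range, so getD is exact.  The fuel argument (enough for
-- the loop to run to completion, see loopB_eq) only makes the recursion
-- structural.
def pushesB (group : List Int) (c : Char) (t acc : List Char) (gi : Nat) (run : Int) :
    List (List Char × List Char × Nat × Int) :=
  (if c ≠ '#' then
      (if 0 < run then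
         (if group.getD gi 0 = run then [(t, (if c = '?' then '.' else c) :: acc, gi + 1, 0)] else [])
       else [(t, (if c = '?' then '.' else c) :: acc, gi, 0)])
    else []) ++
  (if (c = '?' ∨ c = '#') ∧ gi < group.length ∧ run + 1 ≤ group.getD gi 0
    then [(t, '#' :: acc, gi, run + 1)] else [])

def loopB (group : List Int) : Nat → List (List Char × List Char × Nat × Int) → List (List Char) → List (List Char)
  | _, [], out => out
  | 0, _ :: _, out => out
  | Nat.succ f, ([], acc, gi, run) :: stack, out =>
      if (run = 0 ∧ gi = group.length) ∨
         (0 < run ∧ gi + 1 = group.length ∧ group.getD gi 0 = run)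
      then loopB group f stack (out ++ [acc.reverse]) else loopB group f stack out
  | Nat.succ f, (c :: t, acc, gi, run) :: stack, out =>
      loopB group f (pushesB group c t acc gi run ++ stack) out

def count_combinations_alt (spring : String) (group : List Int) : Int × List String :=
  let out := loopB group (3 ^ spring.toList.length) [(spring.toList, [], 0, 0)] []
  ((out.length : Int), out.map String.mk)

-- ===== PRECONDITION & SPEC =====
def Spec_count_combinations (spring : String) (group : List Int) (out : Int × List String) : Prop := out = count_combinations_alt spring group
instance (spring : String) (group : List Int) (out : Int × List String) : Decidable (Spec_count_combinations spring group out) := by unfold Spec_count_combinations; infer_instance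

-- ===== CLAIM (what is proved, stated in full; the proofs are below) =====
def Claim_equal_count_combinations : Prop := ∀ (spring : String) (group : List Int), Dom_count_combinations spring group → Spec_count_combinations spring group (count_combinations spring group)

-- ===== LEMMAS AND PROOFS =====

def groupsFrom : List Char → Int → List Int
  | [], r => if 0 < r then [r] else []
  | c :: t, r =>
      if c = '#' then groupsFrom t (r + 1)
      else if 0 < r then r :: groupsFrom t 0 else groupsFrom t 0

-- Substitute the '?' characters of `s` in order by the characters of `cs`.
def substQ : List Char → List Char → List Char
  | [], _ => []
  | a :: t, cs =>
    if a = '?' then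
      match cs with
      | c :: cs' => c :: substQ t cs'
      | [] => a :: substQ t []
    else a :: substQ t cs

theorem pushesB_measure (group : List Int) (c : Char) (t acc : List Char) (gi : Nat) (run : Int) :
    ((pushesB group c t acc gi run).map (fun fr => 3 ^ fr.1.length)).sum ≤ 2 * 3 ^ t.length := by
  unfold pushesB
  split_ifs <;> simp <;> omega


-- Recursive denotation of the stack loop: the DFS Source B performs, one frame at a time.
def dfsB (group : List Int) : List Char → List Char → Nat → Int → List (List Char)
  | [], acc, _gi, _run =>
      if (_run = 0 ∧ _gi = group.length) ∨
         (0 < _run ∧ _gi + 1 = group.length ∧ group.getD _gi 0 = _run)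
      then [acc] else []
  | c :: rest, acc, gi, run =>
      let place : Char → List (List Char) := fun ch =>
        if ch = '#' then
          if gi < group.length ∧ run + 1 ≤ group.getD gi 0 then
            dfsB group rest (acc ++ [ch]) gi (run + 1)
          else []
        else
          if 0 < run then
            if group.getD gi 0 = run then dfsB group rest (acc ++ [ch]) (gi + 1) 0 else []
          else dfsB group rest (acc ++ [ch]) gi 0
      if c = '?' then place '.' ++ place '#' else place c

theorem pushesB_denote (group : List Int) (c : Char) (t acc : List Char) (gi : Nat) (run : Int) :
    dfsB group (c :: t) acc.reverse gi run
      = ((pushesB group c t acc gi run).map (fun fr => dfsB group fr.1 fr.2.1.reverse fr.2.2.1 fr.2.2.2)).flatten := by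
  show (let place : Char → List (List Char) := fun ch =>
      if ch = '#' then
        if gi < group.length ∧ run + 1 ≤ group.getD gi 0 then
          dfsB group t (acc.reverse ++ [ch]) gi (run + 1)
        else []
      else
        if 0 < run then
          if group.getD gi 0 = run then dfsB group t (acc.reverse ++ [ch]) (gi + 1) 0 else []
        else dfsB group t (acc.reverse ++ [ch]) gi 0
      if c = '?' then place '.' ++ place '#' else place c) = _
  unfold pushesB
  by_cases hq : c = '?'
  · subst hq; norm_num; split_ifs <;> simp_all
  · by_cases hh : c = '#'
    · subst hh; norm_num; split_ifs <;> simp_all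
    · norm_num [hq, hh]; split_ifs <;> simp_all

theorem loopB_eq (group : List Int) : ∀ (fuel : Nat) (stack : List (List Char × List Char × Nat × Int)) (out : List (List Char)),
    (stack.map (fun fr => 3 ^ fr.1.length)).sum ≤ fuel →
    loopB group fuel stack out
      = out ++ (stack.map (fun fr => dfsB group fr.1 fr.2.1.reverse fr.2.2.1 fr.2.2.2)).flatten := by
  intro fuel
  induction fuel with
  | zero =>
      intro stack out hmu
      match stack with
      | [] => simp [loopB]
      | fr :: stack =>
          exfalso
          simp only [List.map_cons, List.sum_cons, Nat.le_zero] at hmu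
          have h1 : 1 ≤ 3 ^ fr.1.length := Nat.one_le_pow _ _ (by norm_num)
          omega
  | succ f ih =>
      intro stack out hmu
      match stack with
      | [] => simp [loopB]
      | ([], acc, gi, run) :: stack =>
          simp only [List.map_cons, List.sum_cons] at hmu
          rw [show (3 : Nat) ^ ([] : List Char).length = 1 by simp] at hmu
          by_cases hcond : (run = 0 ∧ gi = group.length) ∨
              (0 < run ∧ gi + 1 = group.length ∧ group.getD gi 0 = run)
          · rw [loopB, if_pos hcond, ih _ _ (by omega)]
            simp only [List.map_cons, List.flatten_cons]
            rw [show dfsB group [] acc.reverse gi run = (if (run = 0 ∧ gi = group.length) ∨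
               (0 < run ∧ gi + 1 = group.length ∧ group.getD gi 0 = run) then [acc.reverse] else []) from rfl,
              if_pos hcond]
            simp
          · rw [loopB, if_neg hcond, ih _ _ (by omega)]
            simp only [List.map_cons, List.flatten_cons]
            rw [show dfsB group [] acc.reverse gi run = (if (run = 0 ∧ gi = group.length) ∨
               (0 < run ∧ gi + 1 = group.length ∧ group.getD gi 0 = run) then [acc.reverse] else []) from rfl,
              if_neg hcond]
            simp
      | (c :: t, acc, gi, run) :: stack =>
          simp only [List.map_cons, List.sum_cons, List.length_cons, pow_succ] at hmu
          have hp := pushesB_measure group c t acc gi run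
          have h1 : 1 ≤ 3 ^ t.length := Nat.one_le_pow _ _ (by norm_num)
          rw [loopB, ih _ _ (by
            simp only [List.map_append, List.sum_append]
            omega)]
          simp only [List.map_append, List.flatten_append, List.map_cons, List.flatten_cons,
            ← pushesB_denote]

def RHSdfs (group : List Int) (t acc : List Char) (gi : Nat) (run : Int) : List (List Char) :=
  ((pvProduct (t.count '?')).filter
      (fun cs => decide (group.drop gi = groupsFrom (substQ t cs) run))).map
    (fun cs => acc ++ substQ t cs)

theorem countgo_q : ∀ (l : List Char) (fuel acc : Nat), l.length ≤ fuel →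
    PySem.Chars.count.go ['?'] fuel l acc = acc + l.count '?' := by
  intro l
  induction l with
  | nil => intro fuel acc h; cases fuel <;> simp [PySem.Chars.count.go]
  | cons a t ih =>
      intro fuel acc h
      cases fuel with
      | zero => simp at h
      | succ f =>
          by_cases ha : a = '?'
          · subst ha
            rw [show PySem.Chars.count.go ['?'] (f+1) ('?' :: t) acc
                = PySem.Chars.count.go ['?'] f t (acc+1) by
              simp [PySem.Chars.count.go, List.isPrefixOf]]
            rw [ih f (acc+1) (by simpa using h)]
            simp; omega
          · rw [show PySem.Chars.count.go ['?'] (f+1) (a :: t) acc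
                = PySem.Chars.count.go ['?'] f t acc by
              simp [PySem.Chars.count.go, List.isPrefixOf]
              intro h'; exact absurd h'.symm ha]
            rw [ih f acc (by simpa using h)]
            simp [ha]

theorem str_count_q (s : String) : PySem.Str.count s "?" = s.toList.count '?' := by
  have h := countgo_q s.toList s.toList.length 0 (le_refl _)
  simpa [PySem.Str.count, PySem.Chars.count] using h

theorem pySetD_last (pre : List Int) (x v : Int) :
    PySem.List.pySetD (pre ++ [x]) (-1) v = pre ++ [v] := by
  simp [PySem.List.pySetD, PySem.List.pySet?, PySem.List.pyIdx?]

theorem grouping_fold : ∀ (l : List Char) (k r : Int) (pre idx : List Int), 0 ≤ r →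
    (((PySem.List.enumerate l k).foldl
      (fun (st : Int × List Int × List Int) p =>
        if p.2 = '#' then
          (st.1 + 1, PySem.List.pySetD st.2.1 (-1) (st.1 + 1), PySem.List.pySetD st.2.2 (-1) p.1)
        else (0, st.2.1 ++ [0], st.2.2 ++ [(-1 : Int)]))
      (r, pre ++ [r], idx)).2.1.filter (fun x => x != 0))
    = pre.filter (fun x => x != 0) ++ groupsFrom l r := by
  intro l
  induction l with
  | nil =>
      intro k r pre idx hr
      simp [PySem.List.enumerate, groupsFrom, List.filter_append]
      by_cases h : r = 0
      · simp [h]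
      · simp [h, show 0 < r by omega]
  | cons c t ih =>
      intro k r pre idx hr
      rw [PySem.List.enumerate_cons]
      by_cases hc : c = '#'
      · simp only [List.foldl_cons, hc, reduceIte]
        rw [pySetD_last]
        rw [ih (k+1) (r+1) pre _ (by omega)]
        simp [groupsFrom]
      · simp only [List.foldl_cons, hc, reduceIte]
        rw [show (pre ++ [r]) ++ [(0:Int)] = (pre ++ [r]) ++ [(0:Int)] from rfl]
        rw [ih (k+1) 0 (pre ++ [r]) _ (le_refl 0)]
        simp [groupsFrom, hc, List.filter_append]
        by_cases h : r = 0
        · simp [h]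
        · simp [h, show 0 < r by omega]

theorem current_grouping_fst (l : List Char) :
    (current_grouping l '#').1 = groupsFrom l 0 := by
  have h := grouping_fold l 0 0 [] [-1] (le_refl 0)
  simpa [current_grouping] using h

theorem groupsFrom_head : ∀ (l : List Char) (r : Int), 0 < r →
    ∃ a t, groupsFrom l r = a :: t ∧ r ≤ a := by
  intro l
  induction l with
  | nil => intro r hr; exact ⟨r, [], by simp [groupsFrom, hr], le_refl r⟩
  | cons c t ih =>
      intro r hr
      by_cases hc : c = '#'
      · obtain ⟨a, t', h, hle⟩ := ih (r + 1) (by omega)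
        exact ⟨a, t', by simp [groupsFrom, hc, h], by omega⟩
      · exact ⟨r, groupsFrom t 0, by simp [groupsFrom, hc, hr], le_refl r⟩

theorem mem_pvProduct : ∀ (n : Nat) (cs : List Char), cs ∈ pvProduct n →
    cs.length = n ∧ ∀ c ∈ cs, c = '.' ∨ c = '#' := by
  intro n
  induction n with
  | zero => intro cs h; simp [pvProduct] at h; simp [h]
  | succ m ih =>
      intro cs h
      simp [pvProduct] at h
      rcases h with ⟨t, ht, rfl⟩ | ⟨t, ht, rfl⟩ <;>
      · obtain ⟨hl, hm⟩ := ih t ht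
        refine ⟨by simp [hl], ?_⟩
        intro c hc
        rcases List.mem_cons.mp hc with rfl | hc
        · simp
        · exact hm c hc

theorem foldl_replace_push (a : Char) (ha : a ≠ '?') : ∀ (cs : List Char) (t : List Char),
    cs.foldl (fun ns j => pvReplaceOnce ns '?' j) (a :: t)
      = a :: cs.foldl (fun ns j => pvReplaceOnce ns '?' j) t := by
  intro cs
  induction cs with
  | nil => intro t; rfl
  | cons c cs ih =>
      intro t
      simp only [List.foldl_cons]
      rw [show pvReplaceOnce (a :: t) '?' c = a :: pvReplaceOnce t '?' c by
        simp [pvReplaceOnce, ha], ih]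

theorem foldl_replace : ∀ (s cs : List Char), (∀ c ∈ cs, c ≠ '?') → cs.length = s.count '?' →
    cs.foldl (fun ns j => pvReplaceOnce ns '?' j) s = substQ s cs := by
  intro s
  induction s with
  | nil =>
      intro cs _ hl
      simp at hl
      simp [hl, substQ]
  | cons a t ih =>
      intro cs hne hl
      by_cases ha : a = '?'
      · subst ha
        rw [List.count_cons_self] at hl
        cases cs with
        | nil => simp at hl
        | cons c cs' =>
            simp only [List.foldl_cons]
            rw [show pvReplaceOnce ('?' :: t) '?' c = c :: t by simp [pvReplaceOnce]]
            rw [foldl_replace_push c (hne c (by simp)) cs' t]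
            rw [ih cs' (fun x hx => hne x (by simp [hx])) (by simpa using hl)]
            simp [substQ]
      · rw [foldl_replace_push a ha cs t]
        rw [List.count_cons_of_ne ha] at hl
        rw [ih cs (fun x hx => hne x hx) hl]
        simp [substQ, ha]

theorem hash_branch (group : List Int) (t acc : List Char) (gi : Nat) (run : Int)
    (hgi : gi ≤ group.length) (hrun : 0 ≤ run)
    (IH : ∀ acc gi run, gi ≤ group.length → 0 ≤ run → (0 < run → gi < group.length) →
        dfsB group t acc gi run = RHSdfs group t acc gi run) :
    (if gi < group.length ∧ run + 1 ≤ group.getD gi 0 then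
        dfsB group t (acc ++ ['#']) gi (run + 1)
      else []) =
    ((pvProduct (t.count '?')).filter
        (fun cs => decide (group.drop gi = groupsFrom ('#' :: substQ t cs) run))).map
      (fun cs => acc ++ '#' :: substQ t cs) := by
  have hgf : ∀ l, groupsFrom ('#' :: l) run = groupsFrom l (run + 1) := by
    intro l; simp [groupsFrom]
  by_cases hg : gi < group.length ∧ run + 1 ≤ group.getD gi 0
  · rw [if_pos hg, IH _ _ _ hgi (by omega) (fun _ => hg.1)]
    unfold RHSdfs
    have hfil : List.filter (fun cs => decide (group.drop gi = groupsFrom ('#' :: substQ t cs) run)) (pvProduct (t.count '?'))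
        = List.filter (fun cs => decide (group.drop gi = groupsFrom (substQ t cs) (run + 1))) (pvProduct (t.count '?')) :=
      List.filter_congr (fun cs _ => by rw [hgf])
    rw [hfil]
    exact List.map_congr_left (fun cs _ => by simp)
  · rw [if_neg hg]
    symm
    rw [List.map_eq_nil_iff, List.filter_eq_nil_iff]
    intro cs _
    simp only [hgf, decide_eq_true_eq]
    intro hEq
    obtain ⟨a, t2, h, hle⟩ := groupsFrom_head (substQ t cs) (run + 1) (by omega)
    rw [h] at hEq
    by_cases hlt : gi < group.length
    · have hgd : group.getD gi 0 = group[gi] := List.getD_eq_getElem group 0 hlt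
      have hdrop := List.getElem_cons_drop (as := group) (h := hlt)
      rw [← hdrop] at hEq
      have ha : group[gi] = a := (List.cons_eq_cons.mp hEq).1
      have hng : ¬ (run + 1 ≤ group.getD gi 0) := fun hle2 => hg ⟨hlt, hle2⟩
      rw [hgd, ha] at hng
      omega
    · rw [List.drop_eq_nil_iff.mpr (by omega)] at hEq
      exact absurd hEq (by simp)

theorem dot_branch (group : List Int) (t acc : List Char) (gi : Nat) (run : Int) (ch : Char)
    (hch : ¬ ch = '#')
    (hgi : gi ≤ group.length) (hrun : 0 ≤ run) (hopen : 0 < run → gi < group.length)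
    (IH : ∀ acc gi run, gi ≤ group.length → 0 ≤ run → (0 < run → gi < group.length) →
        dfsB group t acc gi run = RHSdfs group t acc gi run) :
    (if 0 < run then
        if group.getD gi 0 = run then dfsB group t (acc ++ [ch]) (gi + 1) 0 else []
      else dfsB group t (acc ++ [ch]) gi 0) =
    ((pvProduct (t.count '?')).filter
        (fun cs => decide (group.drop gi = groupsFrom (ch :: substQ t cs) run))).map
      (fun cs => acc ++ ch :: substQ t cs) := by
  have hgf : ∀ l, groupsFrom (ch :: l) run =
      if 0 < run then run :: groupsFrom l 0 else groupsFrom l 0 := by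
    intro l; simp [groupsFrom, hch]
  by_cases hr : 0 < run
  · rw [if_pos hr]
    have hlt := hopen hr
    have hgd : group.getD gi 0 = group[gi] := List.getD_eq_getElem group 0 hlt
    have hdrop := List.getElem_cons_drop (as := group) (h := hlt)
    by_cases he : group.getD gi 0 = run
    · have he2 : group[gi] = run := by rw [← hgd, he]
      rw [if_pos he, IH _ _ _ (by omega) (le_refl 0) (by omega)]
      unfold RHSdfs
      have hpred : ∀ cs, (decide (group.drop gi = groupsFrom (ch :: substQ t cs) run))
          = (decide (group.drop (gi + 1) = groupsFrom (substQ t cs) 0)) := by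
        intro cs
        rw [decide_eq_decide, hgf, if_pos hr, ← hdrop]
        constructor
        · intro h2; exact (List.cons_eq_cons.mp h2).2
        · intro h2; rw [h2, he2]
      have hfil : List.filter (fun cs => decide (group.drop gi = groupsFrom (ch :: substQ t cs) run)) (pvProduct (t.count '?'))
          = List.filter (fun cs => decide (group.drop (gi + 1) = groupsFrom (substQ t cs) 0)) (pvProduct (t.count '?')) :=
        List.filter_congr (fun cs _ => hpred cs)
      rw [hfil]
      exact List.map_congr_left (fun cs _ => by simp)
    · rw [if_neg he]
      symm
      rw [List.map_eq_nil_iff, List.filter_eq_nil_iff]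
      intro cs _
      simp only [hgf, if_pos hr, decide_eq_true_eq]
      intro hEq
      rw [← hdrop] at hEq
      exact he (by rw [hgd, (List.cons_eq_cons.mp hEq).1])
  · rw [if_neg hr]
    have hr0 : run = 0 := by omega
    subst hr0
    rw [IH _ _ _ hgi (le_refl 0) hopen]
    unfold RHSdfs
    have hfil : List.filter (fun cs => decide (group.drop gi = groupsFrom (ch :: substQ t cs) 0)) (pvProduct (t.count '?'))
        = List.filter (fun cs => decide (group.drop gi = groupsFrom (substQ t cs) 0)) (pvProduct (t.count '?')) :=
      List.filter_congr (fun cs _ => by rw [hgf, if_neg hr])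
    rw [hfil]
    exact List.map_congr_left (fun cs _ => by simp)

theorem dfs_eq (group : List Int) : ∀ (rest acc : List Char) (gi : Nat) (run : Int),
    gi ≤ group.length → 0 ≤ run → (0 < run → gi < group.length) →
    dfsB group rest acc gi run = RHSdfs group rest acc gi run := by
  intro rest
  induction rest with
  | nil =>
      intro acc gi run hgi hrun hopen
      unfold RHSdfs
      rw [show dfsB group [] acc gi run = (if (run = 0 ∧ gi = group.length) ∨
          (0 < run ∧ gi + 1 = group.length ∧ group.getD gi 0 = run) then [acc] else []) from rfl]
      have hsub : substQ [] ([] : List Char) = [] := rfl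
      simp only [List.count_nil, pvProduct, List.filter_cons, List.filter_nil, hsub]
      by_cases hcond : (run = 0 ∧ gi = group.length) ∨
          (0 < run ∧ gi + 1 = group.length ∧ group.getD gi 0 = run)
      · rw [if_pos hcond]
        have hd : group.drop gi = groupsFrom [] run := by
          rcases hcond with ⟨h0, hgl⟩ | ⟨hr, hgl, hgd⟩
          · subst h0; rw [List.drop_eq_nil_iff.mpr (by omega)]; simp [groupsFrom]
          · have hlt : gi < group.length := by omega
            have hdrop := List.getElem_cons_drop (as := group) (h := hlt)
            rw [← hdrop, List.drop_eq_nil_iff.mpr (by omega)]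
            have : group[gi] = run := by rw [← List.getD_eq_getElem group 0 hlt, hgd]
            simp [groupsFrom, hr, this]
        simp [hd, substQ]
      · rw [if_neg hcond]
        have hd : ¬ (group.drop gi = groupsFrom [] run) := by
          intro hEq
          by_cases hr : 0 < run
          · have hlt := hopen hr
            have hdrop := List.getElem_cons_drop (as := group) (h := hlt)
            simp only [groupsFrom, if_pos hr] at hEq
            rw [← hdrop] at hEq
            obtain ⟨h1, h2⟩ := List.cons_eq_cons.mp hEq
            have hgl : gi + 1 = group.length := by
              have := List.drop_eq_nil_iff.mp h2; omega
            exact hcond (Or.inr ⟨hr, hgl, by rw [List.getD_eq_getElem group 0 hlt, h1]⟩)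
          · have hr0 : run = 0 := by omega
            subst hr0
            simp only [groupsFrom] at hEq
            norm_num at hEq
            exact hcond (Or.inl ⟨rfl, by omega⟩)
        simp [hd, substQ]
  | cons c t ih =>
      intro acc gi run hgi hrun hopen
      show (let place : Char → List (List Char) := fun ch =>
        if ch = '#' then
          if gi < group.length ∧ run + 1 ≤ group.getD gi 0 then
            dfsB group t (acc ++ [ch]) gi (run + 1)
          else []
        else
          if 0 < run then
            if group.getD gi 0 = run then dfsB group t (acc ++ [ch]) (gi + 1) 0 else []
          else dfsB group t (acc ++ [ch]) gi 0
        if c = '?' then place '.' ++ place '#' else place c) = _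
      by_cases hq : c = '?'
      · simp only [hq, reduceIte, Char.reduceEq]
        unfold RHSdfs
        have hsub : ∀ (c0 : Char) (cs : List Char),
            substQ ('?' :: t) (c0 :: cs) = c0 :: substQ t cs := by
          intro c0 cs; simp [substQ]
        simp only [show ('?' :: t).count '?' = t.count '?' + 1 by simp,
          pvProduct, List.flatMap_cons, List.flatMap_nil, List.append_nil,
          List.filter_append, List.map_append, List.filter_map, List.map_map,
          Function.comp_def, hsub]
        congr 1
        · exact dot_branch group t acc gi run '.' (by decide) hgi hrun hopen ih
        · exact hash_branch group t acc gi run hgi hrun ih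
      · by_cases hh : c = '#'
        · simp only [hh, reduceIte, Char.reduceEq]
          unfold RHSdfs
          have hsub : ∀ cs, substQ ('#' :: t) cs = '#' :: substQ t cs := by
            intro cs; simp [substQ]
          simp only [show ('#' :: t).count '?' = t.count '?' by simp, hsub]
          exact hash_branch group t acc gi run hgi hrun ih
        · simp only [hq, hh, reduceIte, Char.reduceEq]
          unfold RHSdfs
          have hsub : ∀ cs, substQ (c :: t) cs = c :: substQ t cs := by
            intro cs; simp [substQ, hq]
          simp only [show (c :: t).count '?' = t.count '?' by simp [hq], hsub]
          exact dot_branch group t acc gi run c hh hgi hrun hopen ih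

theorem foldA_split (group : List Int) (s : List Char) :
    ∀ (l : List (List Char)) (k : Int) (out : List String),
    l.foldl
      (fun (st : Int × List String) i =>
        if (current_grouping (i.foldl (fun ns j => pvReplaceOnce ns '?' j) s) '#').1 = group
        then (st.1 + 1, st.2 ++ [String.mk (i.foldl (fun ns j => pvReplaceOnce ns '?' j) s)])
        else st)
      (k, out)
    = (k + ((l.filter (fun i => decide ((current_grouping (i.foldl (fun ns j => pvReplaceOnce ns '?' j) s) '#').1 = group))).length : Int),
       out ++ (l.filter (fun i => decide ((current_grouping (i.foldl (fun ns j => pvReplaceOnce ns '?' j) s) '#').1 = group))).map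
         (fun i => String.mk (i.foldl (fun ns j => pvReplaceOnce ns '?' j) s))) := by
  intro l
  induction l with
  | nil => intro k out; simp
  | cons i l ih =>
      intro k out
      simp only [List.foldl_cons, List.filter_cons]
      by_cases h : (current_grouping (i.foldl (fun ns j => pvReplaceOnce ns '?' j) s) '#').1 = group
      · rw [if_pos h, ih]
        simp [h]
        omega
      · rw [if_neg h, ih]
        simp [h]

-- ===== VERDICT (by name: the statement is the Claim_ definition above) =====
theorem count_combinations_spec : Claim_equal_count_combinations := by
  intro spring group _
  unfold Spec_count_combinations
  unfold count_combinations count_combinations_alt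
  have halt : loopB group (3 ^ spring.toList.length) [(spring.toList, [], 0, 0)] []
      = dfsB group spring.toList [] 0 0 := by
    rw [loopB_eq group _ _ _ (by simp)]; simp
  rw [halt, str_count_q]
  rw [foldA_split group spring.toList (pvProduct (spring.toList.count '?')) 0 []]
  rw [dfs_eq group spring.toList [] 0 0 (by omega) (by omega) (by omega)]
  unfold RHSdfs
  have hfil : (pvProduct (spring.toList.count '?')).filter
      (fun i => decide ((current_grouping (i.foldl (fun ns j => pvReplaceOnce ns '?' j) spring.toList) '#').1 = group))
    = (pvProduct (spring.toList.count '?')).filter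
      (fun cs => decide (group.drop 0 = groupsFrom (substQ spring.toList cs) 0)) := by
    apply List.filter_congr
    intro cs hm
    obtain ⟨hlen, hmem⟩ := mem_pvProduct _ cs hm
    rw [foldl_replace spring.toList cs
      (fun c hc => by rcases hmem c hc with rfl | rfl <;> decide) (by rw [hlen])]
    rw [current_grouping_fst, List.drop_zero, decide_eq_decide]
    exact eq_comm
  rw [hfil]
  have hmap : (List.filter (fun cs => decide (List.drop 0 group = groupsFrom (substQ spring.toList cs) 0))
        (pvProduct (List.count '?' spring.toList))).map
        (fun i => String.mk (i.foldl (fun ns j => pvReplaceOnce ns '?' j) spring.toList))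
      = (List.filter (fun cs => decide (List.drop 0 group = groupsFrom (substQ spring.toList cs) 0))
        (pvProduct (List.count '?' spring.toList))).map
        (fun cs => String.mk (substQ spring.toList cs)) := by
    apply List.map_congr_left
    intro cs hm
    obtain ⟨hlen, hmem⟩ := mem_pvProduct _ cs (List.mem_filter.mp hm).1
    rw [foldl_replace spring.toList cs
      (fun c hc => by rcases hmem c hc with rfl | rfl <;> decide) (by rw [hlen])]
  rw [hmap]
  simp [List.map_map, Function.comp_def]
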